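-- pv_equiv track=rewrite | github.com/pypi-data/pypi-mirror-401 | packages/agentpool/agentpool-2.5.0.tar.gz/agentpool-2.5.0/src/agentpool/prompts/manager.py | parse_prompt_reference
-- ===== SOURCE A (Python) =====
-- def parse_prompt_reference(reference: str) -> tuple[str, str, str | None, dict[str, str]]:
--     """Parse a prompt reference string.
--
--     Args:
--         reference: Format [provider:]name[@version][?var1=val1,var2=val2]
--
--     Returns:
--         Tuple of (provider, identifier, version, variables)
--         Provider defaults to "builtin" if not specified
--     """
--     provider = "builtin"
--     version = None
--     variables: dict[str, str] = {}
--
--     # Split provider and rest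
--     if ":" in reference:
--         provider, identifier = reference.split(":", 1)
--     else:
--         identifier = reference
--
--     # Handle version
--     if "@" in identifier:
--         identifier, version = identifier.split("@", 1)
--
--     # Handle query parameters
--     if "?" in identifier:
--         identifier, query = identifier.split("?", 1)
--         for pair in query.split(","):
--             if "=" not in pair:
--                 continue
--             key, value = pair.split("=", 1)
--             variables[key.strip()] = value.strip()
--
--     return provider, identifier.strip(), version, variables
-- ===== SOURCE B (Python) =====
-- def parse_prompt_reference(reference: str) -> tuple[str, str, str | None, dict[str, str]]:
--     """Single left-to-right pass over the characters instead of three sequential splits."""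
--     seen_colon = False
--     raw = []          # chars before the first ':'
--     name = []         # identifier chars
--     query = None      # chars strictly between the first '?' and the first '@' (None until such a '?' is seen)
--     version = None    # chars after the first '@' (None until '@' is seen)
--     for ch in reference:
--         if not seen_colon and ch == ":":
--             seen_colon = True
--             name, query, version = [], None, None
--             continue
--         if not seen_colon:
--             raw.append(ch)
--         if version is not None:
--             version.append(ch)
--         elif ch == "@":
--             version = []
--         elif query is not None:
--             query.append(ch)
--         elif ch == "?":
--             query = []
--         else:
--             name.append(ch)
--     provider = "".join(raw) if seen_colon else "builtin"
--     variables = {}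
--     if query is not None:
--         for pair in "".join(query).split(","):
--             key, sep, value = pair.partition("=")
--             if sep:
--                 variables[key.strip()] = value.strip()
--     return provider, "".join(name).strip(), "".join(version) if version is not None else None, variables
-- ===== Notes on version B (the rewrite author's own statement) =====
-- stated objective: alternative
-- what changed: Replaces A's three sequential substring-search + split passes with a single left-to-right character scan (a state machine that routes each character into provider/identifier/query/version buffers), keeping only the query-pair loop.
import Mathlib
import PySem

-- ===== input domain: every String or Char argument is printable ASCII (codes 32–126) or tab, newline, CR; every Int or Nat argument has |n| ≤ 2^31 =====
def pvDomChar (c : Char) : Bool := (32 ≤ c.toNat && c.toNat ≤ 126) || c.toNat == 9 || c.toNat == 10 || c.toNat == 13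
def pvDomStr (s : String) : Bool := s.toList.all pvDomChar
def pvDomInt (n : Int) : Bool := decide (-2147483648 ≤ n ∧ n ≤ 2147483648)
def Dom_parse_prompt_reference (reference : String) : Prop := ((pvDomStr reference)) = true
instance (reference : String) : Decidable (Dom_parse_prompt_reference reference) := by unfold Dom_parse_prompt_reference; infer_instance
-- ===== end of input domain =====

-- B replaces A's three sequential "in"-test + split passes by a single left-to-right
-- character scan (a state machine routing each character into the provider/identifier/
-- query/version buffers); objective: alternative (same cost, one pass).

-- ===== PORT A =====
def parse_prompt_reference (reference : String) : String × String × Option String × (List (String × String)) :=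
  let provider := "builtin"
  -- if ":" in reference: provider, identifier = reference.split(":", 1)
  let pi : String × String :=
    if PySem.Str.isIn ":" reference then
      match PySem.Str.splitMax? reference ":" 1 with
      | some [p, i] => (p, i)
      | _ => (provider, reference)   -- unreachable: split at a present separator yields two parts
    else (provider, reference)
  let provider := pi.1
  let identifier := pi.2
  -- if "@" in identifier: identifier, version = identifier.split("@", 1)
  let iv : String × Option String :=
    if PySem.Str.isIn "@" identifier then
      match PySem.Str.splitMax? identifier "@" 1 with
      | some [i, v] => (i, some v)
      | _ => (identifier, none)      -- unreachable
    else (identifier, none)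
  let identifier := iv.1
  let version := iv.2
  -- if "?" in identifier: identifier, query = identifier.split("?", 1); for pair in query.split(","): ...
  let iq : String × PySem.Dict String String :=
    if PySem.Str.isIn "?" identifier then
      match PySem.Str.splitMax? identifier "?" 1 with
      | some [i, q] =>
        (i, ((PySem.Str.split? q ",").getD []).foldl (fun d pair =>
              if PySem.Str.isIn "=" pair then
                match PySem.Str.splitMax? pair "=" 1 with
                | some [k, v] => d.insert (PySem.Str.strip k) (PySem.Str.strip v)
                | _ => d                 -- unreachable
              else d) PySem.Dict.empty)
      | _ => (identifier, PySem.Dict.empty)  -- unreachable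
    else (identifier, PySem.Dict.empty)
  (provider, PySem.Str.strip iq.1, version, iq.2.items)

-- ===== PORT B =====
-- field state: (name chars, query chars once '?' seen, version chars once '@' seen)
def pprFields (f : List Char × Option (List Char) × Option (List Char)) (ch : Char) :
    List Char × Option (List Char) × Option (List Char) :=
  match f with
  | (name, query, version) =>
    match version with
    | some v => (name, query, some (v ++ [ch]))
    | none =>
      if ch == '@' then (name, query, some ([] : List Char))
      else
        match query with
        | some q => (name, some (q ++ [ch]), none)
        | none =>
          if ch == '?' then (name, some ([] : List Char), (none : Option (List Char)))
          else (name ++ [ch], query, (none : Option (List Char)))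

-- full state: (seen_colon, raw chars before the first ':', fields)
def pprStep (st : Bool × List Char × (List Char × Option (List Char) × Option (List Char)))
    (ch : Char) : Bool × List Char × (List Char × Option (List Char) × Option (List Char)) :=
  match st with
  | (seen, raw, f) =>
    if !seen && ch == ':' then
      (true, raw, (([] : List Char), (none : Option (List Char)), (none : Option (List Char))))
    else (seen, if !seen then raw ++ [ch] else raw, pprFields f ch)

-- hand port of pair.partition("="): exact — splits at the first '=' if present
def pprPair (d : PySem.Dict String String) (pair : List Char) : PySem.Dict String String :=
  let key := pair.takeWhile (· ≠ '=')
  match pair.dropWhile (· ≠ '=') with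
  | [] => d
  | _ :: value =>
      d.insert (String.ofList (PySem.Chars.strip key)) (String.ofList (PySem.Chars.strip value))

def parse_prompt_reference_alt (reference : String) : String × String × Option String × (List (String × String)) :=
  let st := reference.toList.foldl pprStep
    (false, ([] : List Char), (([] : List Char), (none : Option (List Char)), (none : Option (List Char))))
  let provider := if st.1 then String.ofList st.2.1 else "builtin"
  let vars : PySem.Dict String String :=
    match st.2.2.2.1 with
    | none => PySem.Dict.empty
    | some q => (PySem.Chars.splitOn q [',']).foldl pprPair PySem.Dict.empty
  (provider, String.ofList (PySem.Chars.strip st.2.2.1),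
   (st.2.2.2.2).map String.ofList, vars.items)

-- ===== PRECONDITION & SPEC =====
def Spec_parse_prompt_reference (reference : String) (out : String × String × Option String × (List (String × String))) : Prop := out = parse_prompt_reference_alt reference
instance (reference : String) (out : String × String × Option String × (List (String × String))) : Decidable (Spec_parse_prompt_reference reference out) := by unfold Spec_parse_prompt_reference; infer_instance

-- ===== CLAIM (what is proved, stated in full; the proofs are below) =====
def Claim_equal_parse_prompt_reference : Prop := ∀ (reference : String), Dom_parse_prompt_reference reference → Spec_parse_prompt_reference reference (parse_prompt_reference reference)

-- ===== LEMMAS AND PROOFS =====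

-- splitOnMax.go with maxsplit exhausted returns the rest as one piece
theorem go_msZero (sep : List Char) (fuel : Nat) (l cur : List Char) (acc : List (List Char)) :
    PySem.Chars.splitOnMax.go sep fuel 0 l cur acc = ((cur.reverse ++ l) :: acc).reverse := by
  cases fuel with
  | zero => simp [PySem.Chars.splitOnMax.go]
  | succ n => cases l <;> simp [PySem.Chars.splitOnMax.go]

-- single-char split, maxsplit 1, separator present: split at its first occurrence
theorem go_one_mem (c : Char) (l : List Char) :
    ∀ (fuel : Nat) (cur : List Char) (acc : List (List Char)), l.length + 1 ≤ fuel → c ∈ l →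
    PySem.Chars.splitOnMax.go [c] fuel 1 l cur acc =
      acc.reverse ++ [cur.reverse ++ l.takeWhile (· ≠ c), (l.dropWhile (· ≠ c)).tail] := by
  induction l with
  | nil => intro _ _ _ _ hm; simp at hm
  | cons d t ih =>
      intro fuel cur acc hf hm
      cases fuel with
      | zero => omega
      | succ n =>
        by_cases hdc : d = c
        · subst hdc
          have : [d].isPrefixOf (d :: t) = true := by simp [List.isPrefixOf]
          simp only [PySem.Chars.splitOnMax.go, this, if_true]
          rw [go_msZero]
          simp
        · have : [c].isPrefixOf (d :: t) = false := by
            simp [List.isPrefixOf]; exact fun h => (hdc h.symm).elim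
          simp only [PySem.Chars.splitOnMax.go, this]
          have hmt : c ∈ t := by cases hm with
            | head => exact (hdc rfl).elim
            | tail _ h => exact h
          have hf' : t.length + 1 ≤ n := by simp only [List.length_cons] at hf; omega
          rw [ih n (d :: cur) acc hf' hmt]
          simp [hdc]

theorem splitOnMax_one_mem (c : Char) (l : List Char) (h : c ∈ l) :
    PySem.Chars.splitOnMax l [c] 1 = [l.takeWhile (· ≠ c), (l.dropWhile (· ≠ c)).tail] := by
  unfold PySem.Chars.splitOnMax
  rw [if_neg (by norm_num), show ((1:Int).toNat) = 1 from rfl,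
    go_one_mem c l (l.length + 1) [] [] (by omega) h]
  simp

theorem isIn_single (c : Char) (l : List Char) :
    PySem.Chars.isIn [c] l = decide (c ∈ l) := by
  by_cases h : c ∈ l
  · simp [h]; rw [PySem.Chars.isIn_iff_infix]; exact (List.singleton_infix_iff c l).mpr h
  · simp [h]; rw [PySem.Chars.isIn_eq_false_iff]
    exact fun hinf => h ((List.singleton_infix_iff c l).mp hinf)

-- the first-occurrence decomposition of a list containing c
theorem span_decomp (c : Char) (l : List Char) (h : c ∈ l) :
    l.takeWhile (· ≠ c) ++ c :: (l.dropWhile (· ≠ c)).tail = l := by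
  induction l with
  | nil => simp at h
  | cons d t ih =>
      by_cases hdc : d = c
      · subst hdc; simp [List.takeWhile_cons, List.dropWhile_cons]
      · have hmt : c ∈ t := by cases h with
          | head => exact (hdc rfl).elim
          | tail _ h => exact h
        have h' := ih hmt
        simp only [ne_eq, decide_not] at h'
        simp [hdc, h']

theorem not_mem_takeWhile_ne (c : Char) (l : List Char) : c ∉ l.takeWhile (· ≠ c) := by
  intro h
  have := List.mem_takeWhile_imp h
  simp at this

-- ---- B-side fold characterisations ----

theorem foldF_ver (cs : List Char) : ∀ (n : List Char) (q : Option (List Char)) (v : List Char),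
    cs.foldl pprFields (n, q, some v) = (n, q, some (v ++ cs)) := by
  induction cs with
  | nil => simp
  | cons c t ih => intro n q v; simp only [List.foldl_cons, pprFields]; rw [ih]; simp

theorem foldF_query (cs : List Char) : ∀ (n q : List Char),
    cs.foldl pprFields (n, some q, none) =
      if '@' ∈ cs then
        (n, some (q ++ cs.takeWhile (· ≠ '@')), some ((cs.dropWhile (· ≠ '@')).tail))
      else (n, some (q ++ cs), none) := by
  induction cs with
  | nil => simp
  | cons c t ih =>
      intro n q
      by_cases hc : c = '@'
      · subst hc
        simp only [List.foldl_cons, pprFields, beq_self_eq_true, if_true]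
        rw [foldF_ver]
        simp [List.takeWhile_cons, List.dropWhile_cons]
      · have hcb : (c == '@') = false := by simp [hc]
        simp only [List.foldl_cons, pprFields, hcb, Bool.false_eq_true, if_false]
        rw [ih]
        have hc' : ¬ ('@' = c) := fun e => hc e.symm
        by_cases hm : '@' ∈ t
        · simp [hm, hc, hc']
        · simp [hm, hc, hc']

theorem foldF_name (cs : List Char) : ∀ (n : List Char),
    cs.foldl pprFields (n, none, none) =
      (n ++ (cs.takeWhile (· ≠ '@')).takeWhile (· ≠ '?'),
       (if '?' ∈ cs.takeWhile (· ≠ '@') then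
          some (((cs.takeWhile (· ≠ '@')).dropWhile (· ≠ '?')).tail) else none),
       (if '@' ∈ cs then some ((cs.dropWhile (· ≠ '@')).tail) else none)) := by
  induction cs with
  | nil => simp
  | cons c t ih =>
      intro n
      by_cases hat : c = '@'
      · subst hat
        simp only [List.foldl_cons, pprFields, beq_self_eq_true, if_pos]
        rw [foldF_ver]
        simp [List.takeWhile_cons, List.dropWhile_cons]
      · by_cases hq : c = '?'
        · subst hq
          have h1 : ('?' == '@') = false := by decide
          simp only [List.foldl_cons, pprFields, h1, Bool.false_eq_true, if_false,
            beq_self_eq_true, if_pos]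
          rw [foldF_query]
          by_cases hm : '@' ∈ t
          · simp [hm]
          · have htw : t.takeWhile (fun x => decide (x ≠ '@')) = t :=
              List.takeWhile_eq_self_iff.mpr (fun x hx => by simp; exact fun e => hm (e ▸ hx))
            simp only [ne_eq, decide_not] at htw
            simp [hm, htw]
        · have h1 : (c == '@') = false := by simp [hat]
          have h2 : (c == '?') = false := by simp [hq]
          simp only [List.foldl_cons, pprFields, h1, h2, Bool.false_eq_true, if_false]
          rw [ih]
          have hat' : ¬ ('@' = c) := fun e => hat e.symm
          have hq' : ¬ ('?' = c) := fun e => hq e.symm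
          simp [hat, hq, hat', hq']

-- ---- full-state fold ----

theorem foldS_seen (cs : List Char) : ∀ (raw : List Char) f,
    cs.foldl pprStep (true, raw, f) = (true, raw, cs.foldl pprFields f) := by
  induction cs with
  | nil => simp
  | cons c t ih => intro raw f; simp only [List.foldl_cons, pprStep]; simp; exact ih raw _

theorem foldS_noColon (cs : List Char) (h : ':' ∉ cs) : ∀ (raw : List Char) f,
    cs.foldl pprStep (false, raw, f) = (false, raw ++ cs, cs.foldl pprFields f) := by
  induction cs with
  | nil => simp
  | cons c t ih =>
      intro raw f
      have hc : ¬ (c = ':') := fun e => h (by simp [e])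
      simp only [List.foldl_cons, pprStep]
      rw [if_neg (by simp [hc]), if_pos (by simp)]
      rw [ih (fun hm => h (List.mem_cons_of_mem _ hm)) (raw ++ [c]) _]
      simp

theorem foldS_colon (a : List Char) (ha : ':' ∉ a) (b : List Char) : ∀ (raw : List Char) f,
    (a ++ ':' :: b).foldl pprStep (false, raw, f) =
      (true, raw ++ a, b.foldl pprFields (([] : List Char), none, none)) := by
  induction a with
  | nil =>
      intro raw f
      simp only [List.nil_append, List.foldl_cons, pprStep]
      rw [if_pos (by simp)]
      simp [foldS_seen]
  | cons c t ih =>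
      intro raw f
      have hc : ¬ (c = ':') := fun e => ha (by simp [e])
      simp only [List.cons_append, List.foldl_cons, pprStep]
      rw [if_neg (by simp [hc]), if_pos (by simp)]
      rw [ih (fun hm => ha (List.mem_cons_of_mem _ hm)) (raw ++ [c]) _]
      simp


-- ---- proof-side decompositions of the two ports (definitional) ----

def pSplit (reference : String) : String × String :=
  if PySem.Str.isIn ":" reference then
    match PySem.Str.splitMax? reference ":" 1 with
    | some [p, i] => (p, i)
    | _ => ("builtin", reference)
  else ("builtin", reference)

def aVars (q : String) : PySem.Dict String String :=
  ((PySem.Str.split? q ",").getD []).foldl (fun d pair =>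
    if PySem.Str.isIn "=" pair then
      match PySem.Str.splitMax? pair "=" 1 with
      | some [k, v] => d.insert (PySem.Str.strip k) (PySem.Str.strip v)
      | _ => d
    else d) PySem.Dict.empty

def aQ (identifier : String) : String × PySem.Dict String String :=
  if PySem.Str.isIn "?" identifier then
    match PySem.Str.splitMax? identifier "?" 1 with
    | some [i, q] => (i, aVars q)
    | _ => (identifier, PySem.Dict.empty)
  else (identifier, PySem.Dict.empty)

def aTail (identifier : String) : String × Option String × List (String × String) :=
  let iv : String × Option String :=
    if PySem.Str.isIn "@" identifier then
      match PySem.Str.splitMax? identifier "@" 1 with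
      | some [i, v] => (i, some v)
      | _ => (identifier, none)
    else (identifier, none)
  let iq := aQ iv.1
  (PySem.Str.strip iq.1, iv.2, iq.2.items)

def bVars (q : Option (List Char)) : PySem.Dict String String :=
  match q with
  | none => PySem.Dict.empty
  | some q => (PySem.Chars.splitOn q [',']).foldl pprPair PySem.Dict.empty

def bTail (f : List Char × Option (List Char) × Option (List Char)) :
    String × Option String × List (String × String) :=
  (String.ofList (PySem.Chars.strip f.1), f.2.2.map String.ofList, (bVars f.2.1).items)

set_option maxHeartbeats 2000000 in
theorem parseA_decomp (reference : String) :
    parse_prompt_reference reference =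
      ((pSplit reference).1, aTail (pSplit reference).2) := rfl

theorem parseB_decomp (reference : String) :
    parse_prompt_reference_alt reference =
      (let st := reference.toList.foldl pprStep
        (false, ([] : List Char), (([] : List Char), (none : Option (List Char)), (none : Option (List Char))))
       ((if st.1 then String.ofList st.2.1 else "builtin"), bTail st.2.2)) := rfl

-- ---- bridges from the String wrappers to the char-list level ----

theorem ofList_isIn (c : Char) (sep : String) (l : List Char) (hs : sep.toList = [c]) :
    PySem.Str.isIn sep (String.ofList l) = decide (c ∈ l) := by
  simp only [PySem.Str.isIn, String.toList_ofList, hs, isIn_single]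

theorem ofList_splitMax (c : Char) (sep : String) (l : List Char) (hs : sep.toList = [c])
    (h : c ∈ l) :
    PySem.Str.splitMax? (String.ofList l) sep 1 =
      some [String.ofList (l.takeWhile (· ≠ c)), String.ofList ((l.dropWhile (· ≠ c)).tail)] := by
  simp only [PySem.Str.splitMax?, PySem.Chars.splitMax?, String.toList_ofList, hs]
  rw [if_neg (by simp), splitOnMax_one_mem c l h]
  rfl

theorem ofList_strip (l : List Char) :
    PySem.Str.strip (String.ofList l) = String.ofList (PySem.Chars.strip l) := by
  simp only [PySem.Str.strip, String.toList_ofList]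

theorem dropWhile_mem_cons (c : Char) (l : List Char) (h : c ∈ l) :
    l.dropWhile (· ≠ c) = c :: (l.dropWhile (· ≠ c)).tail := by
  induction l with
  | nil => simp at h
  | cons d t ih =>
      by_cases hdc : d = c
      · subst hdc; simp [List.dropWhile_cons]
      · have hmt : c ∈ t := by cases h with
          | head => exact (hdc rfl).elim
          | tail _ h => exact h
        rw [List.dropWhile_cons_of_pos (by simp [hdc])]
        exact ih hmt

-- ---- the query-pair loop: A's step equals pprPair ----

theorem pair_step_eq (d : PySem.Dict String String) (pair : List Char) :
    (if PySem.Str.isIn "=" (String.ofList pair) then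
       match PySem.Str.splitMax? (String.ofList pair) "=" 1 with
       | some [k, v] => d.insert (PySem.Str.strip k) (PySem.Str.strip v)
       | _ => d
     else d) = pprPair d pair := by
  by_cases hm : '=' ∈ pair
  · rw [ofList_isIn '=' "=" pair rfl, if_pos (by simpa using hm),
      ofList_splitMax '=' "=" pair rfl hm]
    simp only [pprPair]
    rw [dropWhile_mem_cons '=' pair hm]
    simp [ofList_strip]
  · rw [ofList_isIn '=' "=" pair rfl, if_neg (by simpa using hm)]
    have hd : pair.dropWhile (· ≠ '=') = [] :=
      List.dropWhile_eq_nil_iff.mpr (fun x hx => by simp; exact fun e => hm (e ▸ hx))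
    simp only [ne_eq, decide_not] at hd
    simp [pprPair, hd]

theorem vars_eq (q : List Char) : aVars (String.ofList q) =
    (PySem.Chars.splitOn q [',']).foldl pprPair PySem.Dict.empty := by
  have hs : PySem.Str.split? (String.ofList q) "," =
      some ((PySem.Chars.splitOn q [',']).map String.ofList) := by
    simp only [PySem.Str.split?, PySem.Chars.split?, String.toList_ofList]
    rw [if_neg (by simp [show ("," : String).toList = [','] from rfl])]
    rfl
  simp only [aVars, hs, Option.getD_some]
  rw [List.foldl_map]
  simp only [pair_step_eq]

theorem q_eq (p : List Char) :
    (PySem.Str.strip (aQ (String.ofList p)).1, (aQ (String.ofList p)).2.items)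
    = (String.ofList (PySem.Chars.strip (p.takeWhile (· ≠ '?'))),
       (bVars (if '?' ∈ p then some ((p.dropWhile (· ≠ '?')).tail) else none)).items) := by
  by_cases hq : '?' ∈ p
  · simp only [aQ]
    rw [ofList_isIn '?' "?" p rfl, if_pos (by simpa using hq),
      ofList_splitMax '?' "?" p rfl hq]
    simp [ofList_strip, vars_eq, bVars, hq]
  · simp only [aQ]
    rw [ofList_isIn '?' "?" p rfl, if_neg (by simpa using hq)]
    have htw : p.takeWhile (· ≠ '?') = p :=
      List.takeWhile_eq_self_iff.mpr (fun x hx => by simp; exact fun e => hq (e ▸ hx))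
    simp only [ne_eq, decide_not] at htw
    simp [ofList_strip, bVars, hq, htw]

theorem tail_eq (b : List Char) :
    aTail (String.ofList b) = bTail (b.foldl pprFields (([] : List Char), none, none)) := by
  rw [foldF_name]
  simp only [aTail, bTail]
  by_cases hat : '@' ∈ b
  · rw [ofList_isIn '@' "@" b rfl, if_pos (by simpa using hat),
      ofList_splitMax '@' "@" b rfl hat]
    have h := q_eq (b.takeWhile (· ≠ '@'))
    rw [Prod.ext_iff] at h
    obtain ⟨h1, h2⟩ := h
    simp only [ne_eq, decide_not] at h1 h2 ⊢
    simp [hat, h1, h2]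
  · rw [ofList_isIn '@' "@" b rfl, if_neg (by simpa using hat)]
    have htw : b.takeWhile (· ≠ '@') = b :=
      List.takeWhile_eq_self_iff.mpr (fun x hx => by simp; exact fun e => hat (e ▸ hx))
    have h := q_eq b
    rw [Prod.ext_iff] at h
    obtain ⟨h1, h2⟩ := h
    simp only [ne_eq, decide_not] at h1 h2 htw ⊢
    simp [hat, htw, h1, h2]

theorem main_ofList (cs : List Char) :
    parse_prompt_reference (String.ofList cs) = parse_prompt_reference_alt (String.ofList cs) := by
  rw [parseA_decomp, parseB_decomp]
  simp only [String.toList_ofList]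
  by_cases hcol : ':' ∈ cs
  · have hfold : cs.foldl pprStep (false, ([] : List Char), (([] : List Char), none, none)) =
        (true, cs.takeWhile (· ≠ ':'),
         ((cs.dropWhile (· ≠ ':')).tail).foldl pprFields (([] : List Char), none, none)) := by
      conv_lhs => rw [← span_decomp ':' cs hcol]
      rw [foldS_colon _ (not_mem_takeWhile_ne ':' cs) _ [] _]
      simp
    simp only [pSplit]
    rw [ofList_isIn ':' ":" cs rfl, if_pos (by simpa using hcol),
      ofList_splitMax ':' ":" cs rfl hcol, hfold]
    simp [tail_eq]
  · have hfold := foldS_noColon cs hcol ([] : List Char) (([] : List Char), none, none)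
    simp only [pSplit]
    rw [ofList_isIn ':' ":" cs rfl, if_neg (by simpa using hcol), hfold]
    simp [tail_eq]

-- ===== VERDICT (by name: the statement is the Claim_ definition above) =====
theorem parse_prompt_reference_spec : Claim_equal_parse_prompt_reference := by
  intro reference _
  unfold Spec_parse_prompt_reference
  have := main_ofList reference.toList
  rwa [String.ofList_toList] at this
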